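-- pv_equiv track=rewrite | github.com/seelengxd/aoc-2022 | day08/day8.py | monotonic_stack
-- ===== SOURCE A (Python) =====
-- def monotonic_stack(row):
--     stack = []
--     res = []
--     for index, item in enumerate(row):
--         while stack and stack[-1][1] < item:
--             stack.pop()
--         if stack:
--             res.append(index - stack[-1][0])
--         else:
--             res.append(index)
--         stack.append((index, item))
--     return res
-- ===== SOURCE B (Python) =====
-- def monotonic_stack(row):
--     res = []
--     for i, item in enumerate(row):
--         for j in range(i - 1, -1, -1):
--             if row[j] >= item:
--                 res.append(i - j)
--                 break
--         else:
--             res.append(i)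
--     return res
-- ===== Notes on version B (the rewrite author's own statement) =====
-- stated objective: alternative
-- what changed: Replaces the monotonic stack with a per-index backward scan to the nearest previous element >= the current one (i appended when none exists).
import Mathlib
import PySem

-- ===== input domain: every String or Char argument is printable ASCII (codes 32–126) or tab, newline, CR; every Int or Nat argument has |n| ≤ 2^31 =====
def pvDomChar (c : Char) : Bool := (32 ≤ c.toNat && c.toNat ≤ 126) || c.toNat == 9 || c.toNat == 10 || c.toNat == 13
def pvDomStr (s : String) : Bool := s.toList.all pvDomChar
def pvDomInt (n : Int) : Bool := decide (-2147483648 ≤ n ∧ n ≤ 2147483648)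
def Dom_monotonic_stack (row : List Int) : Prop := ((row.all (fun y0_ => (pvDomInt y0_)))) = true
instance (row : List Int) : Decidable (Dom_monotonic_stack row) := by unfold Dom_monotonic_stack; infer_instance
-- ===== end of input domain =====

-- B replaces A's monotonic stack by a per-index backward scan for the nearest previous element ≥ the current one (alternative decomposition, same results).


-- ===== PORT A =====
-- The Python stack appends/pops at the end; here the stack is a Lean list with the TOP AT THE HEAD
-- (push = cons, stack[-1] = head, pop = tail), an exact representation of the same sequence of operations.
-- 'while stack and stack[-1][1] < item: stack.pop()'
def msPopWhile (item : Int) : List (Int × Int) → List (Int × Int)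
  | [] => []
  | top :: rest => if top.2 < item then msPopWhile item rest else top :: rest

-- the 'for index, item in enumerate(row)' loop, carrying stack and index
def msLoop (stack : List (Int × Int)) (index : Int) : List Int → List Int
  | [] => []
  | item :: rest =>
    let stack' := msPopWhile item stack
    let r : Int := match stack' with
      | [] => index
      | (j, _) :: _ => index - j
    r :: msLoop ((index, item) :: stack') (index + 1) rest

def monotonic_stack (row : List Int) : List Int := msLoop [] 0 row

-- ===== PORT B =====
-- 'for j in range(i-1, -1, -1): if row[j] >= item: …' — the backward scan over the already-seen
-- elements; prev holds the enumerated prefix in reverse (j = i-1 first), exactly the scan order.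
def altScan (i item : Int) : List (Int × Int) → Int
  | [] => i
  | (j, v) :: rest => if v ≥ item then i - j else altScan i item rest

def altLoop (prev : List (Int × Int)) (i : Int) : List Int → List Int
  | [] => []
  | item :: rest => altScan i item prev :: altLoop ((i, item) :: prev) (i + 1) rest

def monotonic_stack_alt (row : List Int) : List Int := altLoop [] 0 row

-- ===== PRECONDITION & SPEC =====
def Spec_monotonic_stack (row : List Int) (out : List Int) : Prop := out = monotonic_stack_alt row
instance (row : List Int) (out : List Int) : Decidable (Spec_monotonic_stack row out) := by unfold Spec_monotonic_stack; infer_instance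

-- ===== CLAIM (what is proved, stated in full; the proofs are below) =====
def Claim_equal_monotonic_stack : Prop := ∀ (row : List Int), Dom_monotonic_stack row → Spec_monotonic_stack row (monotonic_stack row)

-- ===== LEMMAS AND PROOFS =====

-- The stack A maintains, computed directly from the reversed enumerated prefix:
-- the most recent element is on top, below it the nearest earlier element with value ≥ it, and so on.
def stackOf : List (Int × Int) → List (Int × Int)
  | [] => []
  | (j, v) :: rest => (j, v) :: stackOf (rest.dropWhile (fun p => p.2 < v))
termination_by l => l.length
decreasing_by
  exact Nat.lt_succ_of_le (List.length_dropWhile_le _ _)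

theorem dropWhile_dropWhile {α : Type} (p q : α → Bool) (l : List α)
    (h : ∀ x, p x = true → q x = true) :
    (l.dropWhile p).dropWhile q = l.dropWhile q := by
  induction l with
  | nil => rfl
  | cons a t ih =>
    by_cases hp : p a = true
    · have hq := h a hp
      simp [List.dropWhile, hp, hq, ih]
    · simp [List.dropWhile, hp]

theorem popWhile_stackOf (item : Int) (prev : List (Int × Int)) :
    msPopWhile item (stackOf prev) = stackOf (prev.dropWhile (fun p => p.2 < item)) := by
  induction prev using stackOf.induct with
  | case1 => simp [stackOf, msPopWhile]
  | case2 j v rest ih =>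
    by_cases hv : v < item
    · have heq : (rest.dropWhile (fun p => p.2 < v)).dropWhile (fun p => p.2 < item)
          = rest.dropWhile (fun p => p.2 < item) := by
        apply dropWhile_dropWhile
        intro x hx
        simp only [decide_eq_true_eq] at hx ⊢
        omega
      simp [stackOf, msPopWhile, hv, List.dropWhile, ih, heq]
    · simp [stackOf, msPopWhile, hv, List.dropWhile]

theorem altScan_dropWhile (i item : Int) (prev : List (Int × Int)) :
    altScan i item prev =
      (match prev.dropWhile (fun p => p.2 < item) with
       | [] => i
       | (j, _) :: _ => i - j) := by
  induction prev with
  | nil => simp [altScan, List.dropWhile]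
  | cons a t ih =>
    obtain ⟨j, v⟩ := a
    by_cases hv : v < item
    · have : ¬ v ≥ item := by omega
      simp [altScan, List.dropWhile, hv, this, ih]
    · have : v ≥ item := by omega
      simp [altScan, List.dropWhile, hv, this]

theorem msLoop_eq_altLoop (row : List Int) :
    ∀ (prev : List (Int × Int)) (i : Int),
      msLoop (stackOf prev) i row = altLoop prev i row := by
  induction row with
  | nil => intro prev i; rfl
  | cons item rest ih =>
    intro prev i
    have hpop := popWhile_stackOf item prev
    have hscan := altScan_dropWhile i item prev
    have hhead :
        (match stackOf (prev.dropWhile (fun p => p.2 < item)) with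
         | [] => i
         | (j, _) :: _ => i - j)
        = (match prev.dropWhile (fun p => p.2 < item) with
           | [] => i
           | (j, _) :: _ => i - j) := by
      cases h : prev.dropWhile (fun p => p.2 < item) with
      | nil => simp [stackOf]
      | cons a t => obtain ⟨j, v⟩ := a; simp [stackOf]
    have hpush : stackOf ((i, item) :: prev) = (i, item) :: stackOf (prev.dropWhile (fun p => p.2 < item)) := by
      rw [stackOf]
    simp only [msLoop, altLoop, hpop, hscan, hhead, ← hpush]
    rw [ih]

-- ===== VERDICT (by name: the statement is the Claim_ definition above) =====
theorem monotonic_stack_spec : Claim_equal_monotonic_stack := by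
  intro row _
  unfold Spec_monotonic_stack monotonic_stack monotonic_stack_alt
  have := msLoop_eq_altLoop row [] 0
  simpa [stackOf] using this
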